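-- pv_equiv track=rewrite | github.com/clover3/Chair | src/dataset_specific/msmarco/analyze_code/lcs_imp.py | split_indexed
-- ===== SOURCE A (Python) =====
-- def split_indexed(text):
--     st = 0
--     st_list = []
--     ed_list = []
--     tokens = []
--     is_in = False
--     def pop(idx):
--         ed = idx
--         token = text[st:ed]
--         st_list.append(st)
--         ed_list.append(ed)
--         tokens.append(token)
--
--     for idx, c in enumerate(text):
--         if is_in:
--             if c == " ":
--                 pop(idx)
--                 is_in = False
--             else:
--                 pass
--         else:
--             if c == " ":
--                 pass
--             else:
--                 is_in = True
--                 st = idx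
--
--     if is_in:
--         pop(len(text))
--     return tokens, list(zip(st_list, ed_list))
-- ===== SOURCE B (Python) =====
-- def split_indexed(text):
--     tokens = []
--     spans = []
--     i = 0
--     n = len(text)
--     while i < n:
--         if text[i] == ' ':
--             i += 1
--         else:
--             j = i
--             while j < n and text[j] != ' ':
--                 j += 1
--             tokens.append(text[i:j])
--             spans.append((i, j))
--             i = j
--     return tokens, spans
-- ===== Notes on version B (the rewrite author's own statement) =====
-- stated objective: simpler
-- what changed: Replaced the enumerate-driven boolean state machine with three parallel lists plus a final zip by a direct two-pointer scan: skip spaces, advance a second pointer to the token end, and append the token and its span immediately.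
import Mathlib
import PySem

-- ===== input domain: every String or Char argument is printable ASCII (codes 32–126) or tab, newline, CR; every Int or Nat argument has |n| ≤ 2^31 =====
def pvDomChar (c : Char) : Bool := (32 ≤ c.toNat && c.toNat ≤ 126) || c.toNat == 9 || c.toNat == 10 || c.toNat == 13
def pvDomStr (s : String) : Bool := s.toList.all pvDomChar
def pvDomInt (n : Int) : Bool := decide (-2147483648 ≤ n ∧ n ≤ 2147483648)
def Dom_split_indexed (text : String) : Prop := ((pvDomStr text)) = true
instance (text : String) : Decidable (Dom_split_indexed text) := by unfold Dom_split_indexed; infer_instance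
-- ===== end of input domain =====

-- B replaces A's boolean state machine (three parallel lists zipped at the end) by a
-- two-pointer scan that appends each token and span directly; objective: simpler.

-- ===== PORT A =====
-- loop body of A: state (st, st_list, ed_list, tokens, is_in), one enumerate item (idx, c)
def stepA (cs : List Char) (s : Int × List Int × List Int × List String × Bool)
    (p : Int × Char) : Int × List Int × List Int × List String × Bool :=
  match s, p with
  | (st, sts, eds, toks, isin), (idx, c) =>
    if isin then
      if c = ' ' then
        -- pop(idx): token = text[st:idx]
        (st, sts ++ [st], eds ++ [idx],
         toks ++ [String.ofList (PySem.List.slice cs (some st) (some idx))], false)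
      else (st, sts, eds, toks, isin)
    else
      if c = ' ' then (st, sts, eds, toks, isin) else (idx, sts, eds, toks, true)

def split_indexed (text : String) : List String × (List (Int × Int)) :=
  let cs := text.toList
  match (PySem.List.enumerate cs 0).foldl (stepA cs) (0, [], [], [], false) with
  | (st, sts, eds, toks, isin) =>
    if isin then
      -- pop(len(text))
      (toks ++ [String.ofList (PySem.List.slice cs (some st) (some (cs.length : Int)))],
       (sts ++ [st]).zip (eds ++ [(cs.length : Int)]))
    else (toks, sts.zip eds)

-- ===== PORT B =====
-- inner while of Source B: advance j while j < n and text[j] != ' '.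
-- Structural recursion on a fuel counter; the callers pass fuel >= cs.length - j,
-- so the fuel never runs out before the loop condition fails.
def altInner : Nat → List Char → Nat → Nat
  | 0, _, j => j
  | k + 1, cs, j =>
    if h : j < cs.length then
      if cs[j] ≠ ' ' then altInner k cs (j + 1) else j
    else j

-- outer while of Source B (same fuel scheme; i strictly increases each iteration)
def altOuter : Nat → List Char → Nat → List String → List (Int × Int) → List String × (List (Int × Int))
  | 0, _, _, tokens, spans => (tokens, spans)
  | k + 1, cs, i, tokens, spans =>
    if h : i < cs.length then
      if cs[i] = ' ' then altOuter k cs (i + 1) tokens spans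
      else
        let j := altInner (cs.length - i) cs i
        altOuter k cs j
          (tokens ++ [String.ofList (PySem.List.slice cs (some (i : Int)) (some (j : Int)))])
          (spans ++ [((i : Int), (j : Int))])
    else (tokens, spans)

def split_indexed_alt (text : String) : List String × (List (Int × Int)) :=
  altOuter text.toList.length text.toList 0 [] []

-- ===== PRECONDITION & SPEC =====
def Spec_split_indexed (text : String) (out : List String × (List (Int × Int))) : Prop := out = split_indexed_alt text
instance (text : String) (out : List String × (List (Int × Int))) : Decidable (Spec_split_indexed text out) := by unfold Spec_split_indexed; infer_instance

-- ===== CLAIM (what is proved, stated in full; the proofs are below) =====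
def Claim_equal_split_indexed : Prop := ∀ (text : String), Dom_split_indexed text → Spec_split_indexed text (split_indexed text)

-- ===== LEMMAS AND PROOFS =====

-- A's epilogue ("if is_in: pop(len(text)); return tokens, zip(...)") as a function of the final state
def finA (cs : List Char) (s : Int × List Int × List Int × List String × Bool) :
    List String × (List (Int × Int)) :=
  match s with
  | (st, sts, eds, toks, isin) =>
    if isin then
      (toks ++ [String.ofList (PySem.List.slice cs (some st) (some (cs.length : Int)))],
       (sts ++ [st]).zip (eds ++ [(cs.length : Int)]))
    else (toks, sts.zip eds)

theorem split_indexed_eq_finA (text : String) :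
    split_indexed text =
      finA text.toList ((PySem.List.enumerate text.toList 0).foldl (stepA text.toList) (0, [], [], [], false)) := by
  simp only [split_indexed, finA]

-- folding A's step over a run of non-space chars in the is_in state is a no-op
theorem stepA_true_run (cs : List Char) (run : List Char) (hrun : ∀ c ∈ run, c ≠ ' ')
    (m : Int) (st : Int) (sts eds : List Int) (toks : List String) :
    (PySem.List.enumerate run m).foldl (stepA cs) (st, sts, eds, toks, true)
      = (st, sts, eds, toks, true) := by
  induction run generalizing m with
  | nil => simp [PySem.List.enumerate_nil]
  | cons c rest ih =>
    rw [PySem.List.enumerate_cons]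
    have hc : c ≠ ' ' := hrun c (by simp)
    simp only [List.foldl_cons, stepA, if_neg hc]
    exact ih (fun c h => hrun c (by simp [h])) (m + 1)

theorem altInner_eq_takeWhile (k : Nat) : ∀ (cs : List Char) (j : Nat), cs.length - j ≤ k →
    altInner k cs j = j + ((cs.drop j).takeWhile (fun c => c != ' ')).length := by
  induction k with
  | zero =>
    intro cs j hk
    rw [List.drop_eq_nil_of_le (by omega)]
    simp [altInner]
  | succ k ihk =>
    intro cs j hk
    by_cases h : j < cs.length
    · by_cases hc : cs[j] = ' '
      · simp only [altInner, dif_pos h, if_neg (not_not_intro hc)]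
        rw [List.drop_eq_getElem_cons h, List.takeWhile_cons_of_neg (by simp [hc])]
        simp
      · simp only [altInner, dif_pos h, if_pos hc]
        rw [ihk cs (j + 1) (by omega), List.drop_eq_getElem_cons h,
          List.takeWhile_cons_of_pos (by simpa using hc)]
        simp; omega
    · rw [List.drop_eq_nil_of_le (by omega)]
      simp [altInner, h]

-- when the index has reached the end, the outer while returns its accumulators at any fuel
theorem altOuter_done (k : Nat) (cs : List Char) (i : Nat) (hi : cs.length ≤ i)
    (tokens : List String) (spans : List (Int × Int)) :
    altOuter k cs i tokens spans = (tokens, spans) := by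
  cases k with
  | zero => rfl
  | succ k => simp only [altOuter, dif_neg (by omega : ¬ i < cs.length)]

-- main loop correspondence: from the not-in-token state at position n, A's remaining fold
-- (plus its epilogue) computes exactly what B's outer while computes from i = n
theorem main_loop : ∀ (fuel : Nat) (full : List Char) (n : Nat), full.length - n ≤ fuel →
    n ≤ full.length →
    ∀ (st : Int) (sts eds : List Int) (toks : List String) (spans : List (Int × Int)),
    sts.length = eds.length → spans = sts.zip eds →
    finA full ((PySem.List.enumerate (full.drop n) (n : Int)).foldl (stepA full) (st, sts, eds, toks, false))
      = altOuter fuel full n toks spans := by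
  intro fuel
  induction fuel using Nat.strong_induction_on with
  | _ fuel ih =>
  intro full n hf hn st sts eds toks spans hl hs
  by_cases h : n < full.length
  · obtain ⟨k, rfl⟩ : ∃ k, fuel = k + 1 := ⟨fuel - 1, by omega⟩
    have hd : full.drop n = full[n] :: full.drop (n + 1) := List.drop_eq_getElem_cons h
    by_cases hc : full[n] = ' '
    · -- space: both sides skip one char
      rw [hd, PySem.List.enumerate_cons, List.foldl_cons]
      simp only [stepA, if_neg Bool.false_ne_true, if_pos hc]
      simp only [altOuter, dif_pos h, if_pos hc]
      have hcast1 : ((n : Int) + 1) = ((n + 1 : Nat) : Int) := by push_cast; ring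
      rw [hcast1]
      exact ih k (by omega) full (n + 1) (by omega) (by omega) st sts eds toks spans hl hs
    · -- token starts at n
      have hrun := List.takeWhile_append_dropWhile (p := fun c => c != ' ') (l := full.drop (n+1))
      set run := (full.drop (n+1)).takeWhile (fun c => c != ' ') with hrundef
      set rest2 := (full.drop (n+1)).dropWhile (fun c => c != ' ') with hrest2def
      have hj : altInner (full.length - n) full n = n + 1 + run.length := by
        rw [altInner_eq_takeWhile (full.length - n) full n (by omega), hd,
          List.takeWhile_cons_of_pos (by simpa using hc)]
        simp [hrundef]; omega
      have hrunlen : n + 1 + run.length ≤ full.length := by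
        have h1 := congrArg List.length hrun
        simp at h1; omega
      have hrunmem : ∀ c ∈ run, c ≠ ' ' := by
        intro c hcm
        have := List.mem_takeWhile_imp hcm
        simpa using this
      -- split the enumerate at the token end
      rw [hd, PySem.List.enumerate_cons, List.foldl_cons]
      simp only [stepA, if_neg Bool.false_ne_true, if_neg hc]
      rw [← hrun, PySem.List.enumerate_append, List.foldl_append]
      rw [stepA_true_run full run hrunmem]
      -- B takes the token branch
      simp only [altOuter, dif_pos h, if_neg hc]
      rw [hj]
      match hrest2 : rest2 with
      | [] =>
        -- token runs to the end of the string
        have hlen : n + 1 + run.length = full.length := by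
          have := congrArg List.length hrun
          simp at this; omega
        rw [PySem.List.enumerate_nil, List.foldl_nil]
        simp only [finA]
        rw [altOuter_done k full (n + 1 + run.length) (by omega)]
        rw [if_pos trivial, ← hlen, hs, List.zip_append hl]
        simp
      | c2 :: rest3 =>
        -- first char after the token is a space: A pops there, B records the span and skips it
        have hc2 : c2 = ' ' := by
          have h2 := List.find?_eq_head?_dropWhile_not (fun c => c == ' ') (full.drop (n+1))
          have h3 : (full.drop (n+1)).find? (fun c => c == ' ') = some c2 := by
            rw [h2]
            have he : (fun c : Char => !(c == ' ')) = (fun c : Char => c != ' ') := by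
              funext c; simp [bne]
            rw [he, ← hrest2def]
            rfl
          simpa using List.find?_some h3
        have hfr : full.drop (n + 1 + run.length) = c2 :: rest3 := by
          have hdd : full.drop (n + 1 + run.length) = (full.drop (n+1)).drop run.length := by
            rw [List.drop_drop]
          rw [hdd, ← hrun, List.drop_left]
        have hfr3 : full.drop (n + 1 + run.length + 1) = rest3 := by
          have hdd : full.drop (n + 1 + run.length + 1) = (full.drop (n + 1 + run.length)).drop 1 := by
            rw [List.drop_drop]
          rw [hdd, hfr]
          rfl
        have hlt : n + 1 + run.length < full.length := by
          have := congrArg List.length hfr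
          simp at this; omega
        rw [PySem.List.enumerate_cons, List.foldl_cons]
        simp only [stepA, if_pos hc2]
        rw [if_pos trivial]
        have hcast : ((n : Int) + 1 + (run.length : Int)) = ((n + 1 + run.length : Nat) : Int) := by push_cast; ring
        have hcast2 : ((n : Int) + 1 + (run.length : Int) + 1) = ((n + 1 + run.length + 1 : Nat) : Int) := by push_cast; ring
        rw [hcast2, ← hfr3]
        obtain ⟨k', rfl⟩ : ∃ k', k = k' + 1 := ⟨k - 1, by omega⟩
        rw [ih k' (by omega) full (n + 1 + run.length + 1) (by omega) (by omega) _ _ _ _ _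
              (by simp [hl]) rfl]
        -- B: at index n+1+run.length the char is a space, so the outer while skips it
        have hch : full[n + 1 + run.length]'hlt = c2 := by
          have h4 := (List.drop_eq_getElem_cons hlt).symm.trans hfr
          exact (List.cons_eq_cons.mp h4).1
        conv_rhs => rw [altOuter]
        simp only [dif_pos hlt, hch, if_pos hc2]
        congr 1
        rw [hs, List.zip_append hl, hcast]
        simp
  · have hn' : n = full.length := by omega
    subst hn'
    rw [List.drop_length, PySem.List.enumerate_nil, List.foldl_nil]
    rw [altOuter_done fuel full full.length (by omega)]
    simp [finA, hs]

-- ===== VERDICT (by name: the statement is the Claim_ definition above) =====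
theorem split_indexed_spec : Claim_equal_split_indexed := by
  intro text _
  unfold Spec_split_indexed split_indexed_alt
  rw [split_indexed_eq_finA]
  have := main_loop text.toList.length text.toList 0 (by omega) (by omega) 0 [] [] [] [] rfl rfl
  simpa using this
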